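-- pv_equiv track=rewrite | github.com/jinddobaegi/algo | week26/16940/16940_chan.py | bfs_check
-- ===== SOURCE A (Python) =====
-- from collections import deque
-- from collections import deque
--
-- def bfs_check(graph, bfs_order):
--     N = len(graph) - 1
--     visited = [-1] * (N + 1)
--     children = [set() for _ in range(N + 1)]
--
--     # BFS 탐색 수행
--     queue = deque([1])
--     visited[1] = 0
--     index = 1  # bfs_order에서 탐색 순서
--
--     while queue:
--         current = queue.popleft()
--
--         child_set = set()  # 현재 노드의 자식 노드 집합
--
--         # 인접한 노드들 탐색
--         for neighbor in graph[current]: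
--             if visited[neighbor] == -1:
--                 visited[neighbor] = visited[current] + 1
--                 queue.append(neighbor)
--                 child_set.add(neighbor)
--
--         # 주어진 BFS 순서에서 자식 노드들이 올바르게 배치되었는지 확인
--         expected_child_set = set(bfs_order[index:index + len(child_set)])
--         if child_set != expected_child_set:
--             return False
--
--         # 다음 자식 노드들을 확인하도록 index를 증가
--         index += len(child_set)
--
--     return True
-- ===== SOURCE B (Python) =====
-- def bfs_check(graph, bfs_order):
--     # Phase 1: BFS from node 1 (index-pointer list instead of a deque),
--     # recording only each discovered node's parent label.
--     n = len(graph)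
--     visited = [False] * n
--     visited[1] = True
--     order = [1]
--     parent = {}
--     head = 0
--     while head < len(order):
--         u = order[head]
--         head += 1
--         for v in graph[u]:
--             if not visited[v]:
--                 visited[v] = True
--                 parent[v] = u
--                 order.append(v)
--     # Phase 2: per-position validation: position i of bfs_order must hold a
--     # node whose BFS parent equals the parent of the i-th discovered node,
--     # and no node may be used twice.  (No sets of slices are compared.)
--     used = set()
--     for i in range(1, len(order)):
--         if i >= len(bfs_order):
--             return False
--         x = bfs_order[i]
--         if x not in parent or parent[x] != parent[order[i]] or x in used:
--             return False
--         used.add(x)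
--     return True
-- ===== Notes on version B (the rewrite author's own statement) =====
-- stated objective: alternative
-- what changed: B drops A's per-node child-set vs slice-set comparisons entirely: it first runs the BFS recording only a parent map (index-pointer list instead of a deque), then validates bfs_order one position at a time by a parent-consistency check (the node at position i must be a discovered node whose BFS parent equals the parent of the i-th discovered node, and no node may be used twice). …
-- outside the precondition, e.g. on bfs_check([[], [2], [99]], []): A returns False, B raises IndexError
import Mathlib
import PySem

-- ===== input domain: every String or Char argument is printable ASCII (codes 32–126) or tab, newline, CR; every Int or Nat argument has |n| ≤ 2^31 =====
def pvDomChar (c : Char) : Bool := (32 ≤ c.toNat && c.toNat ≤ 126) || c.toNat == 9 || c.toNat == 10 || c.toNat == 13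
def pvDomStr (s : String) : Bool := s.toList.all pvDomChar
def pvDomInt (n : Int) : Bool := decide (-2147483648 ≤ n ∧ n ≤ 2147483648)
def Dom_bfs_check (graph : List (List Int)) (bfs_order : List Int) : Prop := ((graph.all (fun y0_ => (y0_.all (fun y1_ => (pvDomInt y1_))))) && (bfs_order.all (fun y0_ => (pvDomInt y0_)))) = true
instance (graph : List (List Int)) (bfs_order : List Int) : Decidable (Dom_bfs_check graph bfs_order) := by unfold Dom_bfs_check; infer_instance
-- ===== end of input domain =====

-- B replaces A's per-node child-set vs. slice-set comparisons by a BFS parent map plus a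
-- per-position validation of bfs_order (parent-consistency and no-reuse); same return value.

-- ===== PORT A =====
-- body of A's 'for neighbor in graph[current]' loop; state = (visited, queue, child_set)
def stepA (current : Int) (st : List Int × List Int × PySem.Set Int) (neighbor : Int) :
    List Int × List Int × PySem.Set Int :=
  if PySem.List.pyGetD st.1 neighbor 0 == -1 then
    (PySem.List.pySetD st.1 neighbor (PySem.List.pyGetD st.1 current 0 + 1),
     st.2.1 ++ [neighbor], PySem.Set.add st.2.2 neighbor)
  else st

-- A's while-loop; fuel (graph.length + 1) strictly bounds the number of pops on every input
-- admitted by Pre_ (each enqueue marks a fresh visited cell), so the fuel-0 branch is unreachable there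
def bfsLoopA (graph : List (List Int)) (bfs_order : List Int) :
    Nat → List Int → List Int → Int → Bool
  | 0, _, _, _ => false
  | fuel+1, queue, visited, index =>
    match queue with
    | [] => true
    | current :: queue' =>
      let st := (PySem.List.pyGetD graph current []).foldl (stepA current)
        (visited, queue', PySem.Set.empty)
      let expected := PySem.Set.ofList
        (PySem.List.slice bfs_order (some index) (some (index + PySem.Set.len st.2.2)))
      if !PySem.Set.equal st.2.2 expected then false
      else bfsLoopA graph bfs_order fuel st.2.1 st.1 (index + PySem.Set.len st.2.2)

def bfs_check (graph : List (List Int)) (bfs_order : List Int) : Bool :=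
  let N : Int := (graph.length : Int) - 1
  let visited : List Int := List.replicate (N + 1).toNat (-1)
  let _children : List (PySem.Set Int) := List.replicate (N + 1).toNat PySem.Set.empty  -- built but never used in A
  match PySem.List.pySet? visited 1 0 with   -- visited[1] = 0 (IndexError when len(graph) < 2, outside Pre_)
  | none => false
  | some visited1 => bfsLoopA graph bfs_order (graph.length + 1) [1] visited1 1

-- ===== PORT B =====
-- body of Source B's 'for v in graph[u]' loop; state = (visited, parent, order)
def stepB (u : Int) (st : List Bool × PySem.Dict Int Int × List Int) (v : Int) :
    List Bool × PySem.Dict Int Int × List Int :=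
  if !PySem.List.pyGetD st.1 v true then
    (PySem.List.pySetD st.1 v true, st.2.1.insert v u, st.2.2 ++ [v])
  else st

-- Source B's phase-1 while-loop (index pointer 'head' into the growing 'order' list);
-- same fuel device as the A port (none = fuel exhausted, unreachable under Pre_)
def bfsB (graph : List (List Int)) :
    Nat → List Bool → PySem.Dict Int Int → List Int → Nat →
    Option (PySem.Dict Int Int × List Int)
  | 0, _, _, _, _ => none
  | fuel+1, visited, parent, order, head =>
    if head < order.length then
      let u := order.getD head 0
      let st := (PySem.List.pyGetD graph u []).foldl (stepB u) (visited, parent, order)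
      bfsB graph fuel st.1 st.2.1 st.2.2 (head+1)
    else some (parent, order)

-- Source B's phase-2 'for i in range(1, len(order))' loop, recursing over order.drop 1
def judgeB (bfs_order : List Int) (parent : PySem.Dict Int Int) :
    Nat → List Int → PySem.Set Int → Bool
  | _, [], _ => true
  | i, o :: rest, used =>
    if bfs_order.length ≤ i then false
    else
      let x := PySem.List.pyGetD bfs_order (i : Int) 0
      match PySem.Dict.get? parent x, PySem.Dict.get? parent o with
      | some px, some po =>
        if px != po || PySem.Set.contains used x then false
        else judgeB bfs_order parent (i+1) rest (PySem.Set.add used x)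
      | _, _ => false   -- 'x not in parent' → False; 'parent[order[i]]' never misses in Python

def bfs_check_alt (graph : List (List Int)) (bfs_order : List Int) : Bool :=
  let visited : List Bool := List.replicate graph.length false
  match PySem.List.pySet? visited 1 true with   -- visited[1] = True (IndexError when len(graph) < 2)
  | none => false
  | some visited1 =>
    match bfsB graph (graph.length + 1) visited1 PySem.Dict.empty [1] 0 with
    | none => false
    | some (parent, order) => judgeB bfs_order parent 1 (order.drop 1) PySem.Set.empty

-- ===== PRECONDITION & SPEC =====
-- row index a (possibly negative, in-range) label denotes, Python's wrap rule
def pvRowOf (n : Nat) (v : Int) : Nat := (if v < 0 then v + (n : Int) else v).toNat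
-- one expansion step of "rows reachable from row 1 along in-range neighbour labels"
def pvReachStep (graph : List (List Int)) (s : List Nat) : List Nat :=
  PySem.Set.ofList (s ++ s.flatMap (fun k =>
    ((graph.getD k []).filter (fun nb =>
        decide (-(graph.length : Int) ≤ nb ∧ nb < (graph.length : Int)))).map
      (pvRowOf graph.length)))
-- Pre_ excludes exactly the inputs on which the full BFS from node 1 touches a neighbour label
-- outside Python's index range for the visited list (or len(graph) < 2, where visited[1] = … raises):
-- there Python B raises IndexError, and so does Python A unless its early `return False` fires first.
def Pre_bfs_check (graph : List (List Int)) (bfs_order : List Int) : Prop :=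
  2 ≤ graph.length ∧
  ∀ k ∈ (pvReachStep graph)^[graph.length] [1],
    ∀ nb ∈ graph.getD k [], -(graph.length : Int) ≤ nb ∧ nb < (graph.length : Int)
instance (graph : List (List Int)) (bfs_order : List Int) : Decidable (Pre_bfs_check graph bfs_order) := by
  unfold Pre_bfs_check; infer_instance

def pvWitness_bfs_check : List (List Int) × List Int := ([[], [2], []], [1, 2])

def Spec_bfs_check (graph : List (List Int)) (bfs_order : List Int) (out : Bool) : Prop := out = bfs_check_alt graph bfs_order
instance (graph : List (List Int)) (bfs_order : List Int) (out : Bool) : Decidable (Spec_bfs_check graph bfs_order out) := by unfold Spec_bfs_check; infer_instance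

-- ===== CLAIM (what is proved, stated in full; the proofs are below) =====
def Claim_equal_bfs_check : Prop := ∀ (graph : List (List Int)) (bfs_order : List Int), Dom_bfs_check graph bfs_order → Pre_bfs_check graph bfs_order → Spec_bfs_check graph bfs_order (bfs_check graph bfs_order)

-- ===== LEMMAS AND PROOFS =====

-- the visited relation between the two ports: a cell is "visited" iff A's stored depth is ≠ -1
def visRel (x : Int) : Bool := x != -1

lemma pyGetD_eq_getD_pyGet? {α : Type} (l : List α) (i : Int) (d : α) :
    PySem.List.pyGetD l i d = (PySem.List.pyGet? l i).getD d := by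
  rfl

lemma map_pySetD {α β : Type} (f : α → β) (l : List α) (i : Int) (v : α) :
    (PySem.List.pySetD l i v).map f = PySem.List.pySetD (l.map f) i (f v) := by
  simp only [PySem.List.pySetD, PySem.List.pySet?, List.length_map]
  cases PySem.List.pyIdx? l.length i <;> simp

lemma inv_pyGetD {l : List Int} (hinv : ∀ x ∈ l, -1 ≤ x) (i : Int) :
    -1 ≤ PySem.List.pyGetD l i 0 := by
  simp only [PySem.List.pyGetD]
  rcases h : PySem.List.pyGet? l i with _ | y
  · simp
  · simpa using hinv y (PySem.List.mem_of_pyGet?_eq_some l h)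

lemma mem_pySetD {α : Type} {l : List α} {i : Int} {v x : α}
    (h : x ∈ PySem.List.pySetD l i v) : x ∈ l ∨ x = v := by
  rcases h' : PySem.List.pyIdx? l.length i with _ | k
  · simp only [PySem.List.pySetD, PySem.List.pySet?, h', Option.map_none, Option.getD_none] at h
    exact Or.inl h
  · simp only [PySem.List.pySetD, PySem.List.pySet?, h', Option.map_some, Option.getD_some] at h
    exact List.mem_or_eq_of_mem_set h

-- a write to a cell whose current value differs from x's cell value leaves x's read unchanged
lemma pyIdx?_lt {n : Nat} {i : Int} {j : Nat} (h : PySem.List.pyIdx? n i = some j) : j < n := by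
  unfold PySem.List.pyIdx? at h
  split_ifs at h <;> simp_all <;> omega

lemma pyGet?_pySetD_of_getD_ne {α : Type} (l : List α) (d : α) (v x : Int) (w : α)
    (h : PySem.List.pyGetD l x d ≠ PySem.List.pyGetD l v d) :
    PySem.List.pyGet? (PySem.List.pySetD l v w) x = PySem.List.pyGet? l x := by
  simp only [PySem.List.pySetD, PySem.List.pySet?]
  rcases hv : PySem.List.pyIdx? l.length v with _ | j
  · simp
  · have hj := pyIdx?_lt hv
    simp only [Option.map_some, Option.getD_some, PySem.List.pyGet?, List.length_set]
    rcases hx : PySem.List.pyIdx? l.length x with _ | k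
    · simp
    · have hk := pyIdx?_lt hx
      have hne : k ≠ j := by
        intro he; subst he
        apply h
        simp [pyGetD_eq_getD_pyGet?, PySem.List.pyGet?, hx, hv,
          List.getElem?_eq_getElem, hj, hk]
      simp only [Option.bind_some]
      rw [List.getElem?_set_ne (by omega : j ≠ k)]

lemma pyGet?_pySetD_self_of_isSome {α : Type} (l : List α) (v : Int) (w : α)
    (h : (PySem.List.pyGet? l v).isSome) :
    PySem.List.pyGet? (PySem.List.pySetD l v w) v = some w := by
  simp only [PySem.List.pyGet?] at h
  rcases hv : PySem.List.pyIdx? l.length v with _ | j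
  · rw [hv] at h; simp at h
  · have hj := pyIdx?_lt hv
    simp only [PySem.List.pySetD, PySem.List.pySet?, hv, Option.map_some, Option.getD_some,
      PySem.List.pyGet?, List.length_set, hv, Option.bind_some]
    simp [List.getElem?_set_self, hj]

-- correspondence of the two inner folds over graph[u], with all facts about the freshly
-- discovered labels L needed by the outer induction
lemma fold_corr (u : Int) (ns : List Int) :
    ∀ (visA : List Int) (q : List Int) (cs : PySem.Set Int)
      (parent : PySem.Dict Int Int) (o : List Int),
    (∀ x ∈ visA, -1 ≤ x) →
    ∃ (L : List Int) (visA' : List Int),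
      ns.foldl (stepA u) (visA, q, cs) = (visA', q ++ L, PySem.Set.update cs L) ∧
      ns.foldl (stepB u) (visA.map visRel, parent, o) =
        (visA'.map visRel, L.foldl (fun d v => d.insert v u) parent, o ++ L) ∧
      (∀ x ∈ visA', -1 ≤ x) ∧
      L.Nodup ∧
      (∀ x ∈ L, PySem.List.pyGetD visA x 0 = -1) ∧
      (∀ x : Int, PySem.List.pyGetD visA x 0 ≠ -1 →
        PySem.List.pyGet? visA' x = PySem.List.pyGet? visA x) ∧
      (∀ x ∈ L, PySem.List.pyGetD visA' x 0 ≠ -1 ∧ (PySem.List.pyGet? visA' x).isSome) := by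
  induction ns with
  | nil =>
    intro visA q cs parent o hinv
    exact ⟨[], visA, by simp [PySem.Set.update], by simp, hinv, by simp, by simp,
      fun x _ => rfl, by simp⟩
  | cons v ns ih =>
    intro visA q cs parent o hinv
    simp only [List.foldl_cons]
    have hgetB : PySem.List.pyGetD (visA.map visRel) v true = visRel (PySem.List.pyGetD visA v 0) := by
      have h0 : (true : Bool) = visRel 0 := by decide
      rw [h0, PySem.List.pyGetD_map]
    by_cases hvis : PySem.List.pyGetD visA v 0 = -1
    · -- fresh neighbour: both ports mark it, record it, append it
      have hget? : PySem.List.pyGet? visA v = some (-1) := by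
        rw [pyGetD_eq_getD_pyGet?] at hvis
        rcases h : PySem.List.pyGet? visA v with _ | y
        · rw [h] at hvis; simp at hvis
        · rw [h] at hvis; simp at hvis; rw [hvis]
      have hd := inv_pyGetD hinv u
      set dnew : Int := PySem.List.pyGetD visA u 0 + 1 with hdnew
      have hdpos : dnew ≠ -1 := by omega
      have hvA : stepA u (visA, q, cs) v =
          (PySem.List.pySetD visA v dnew, q ++ [v], PySem.Set.add cs v) := by
        simp [stepA, hvis, hdnew]
      have hvB : stepB u (visA.map visRel, parent, o) v =
          ((PySem.List.pySetD visA v dnew).map visRel, parent.insert v u, o ++ [v]) := by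
        simp only [stepB, hgetB, hvis]
        rw [map_pySetD]
        have : visRel dnew = true := by simp [visRel, hdpos]
        rw [this]
        simp [visRel]
      rw [hvA, hvB]
      set visA1 := PySem.List.pySetD visA v dnew with hvisA1
      have hinv1 : ∀ x ∈ visA1, -1 ≤ x := by
        intro x hx
        rcases mem_pySetD hx with hx' | hx'
        · exact hinv x hx'
        · omega
      -- reads in visA1: v's cell now holds dnew; visited cells unchanged
      have hself : PySem.List.pyGet? visA1 v = some dnew :=
        pyGet?_pySetD_self_of_isSome visA v dnew (by rw [hget?]; rfl)
      have hselfD : PySem.List.pyGetD visA1 v 0 = dnew := by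
        rw [pyGetD_eq_getD_pyGet?, hself]; rfl
      have hkeep : ∀ x : Int, PySem.List.pyGetD visA x 0 ≠ -1 →
          PySem.List.pyGet? visA1 x = PySem.List.pyGet? visA x := by
        intro x hx
        exact pyGet?_pySetD_of_getD_ne visA 0 v x dnew (by rw [hvis]; exact hx)
      have hkeepD : ∀ x : Int, PySem.List.pyGetD visA x 0 ≠ -1 →
          PySem.List.pyGetD visA1 x 0 = PySem.List.pyGetD visA x 0 := by
        intro x hx
        rw [pyGetD_eq_getD_pyGet?, hkeep x hx, pyGetD_eq_getD_pyGet?]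
      obtain ⟨L, visA', hA, hB, hinv', hnd, hfresh, hpres, hnew⟩ :=
        ih visA1 (q ++ [v]) (PySem.Set.add cs v) (parent.insert v u) (o ++ [v]) hinv1
      refine ⟨v :: L, visA', ?_, ?_, hinv', ?_, ?_, ?_, ?_⟩
      · rw [hA]; simp [PySem.Set.update_cons]
      · rw [hB]; simp
      · -- Nodup (v :: L): v's cell is no longer -1 in visA1
        refine List.nodup_cons.mpr ⟨fun hvL => ?_, hnd⟩
        have := hfresh v hvL
        rw [hselfD] at this
        exact hdpos this
      · intro x hx
        rcases List.mem_cons.mp hx with rfl | hx'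
        · exact hvis
        · -- x ∈ L was fresh in visA1; it was fresh in visA too
          by_contra hne
          have := hkeepD x hne
          rw [hfresh x hx'] at this
          exact hne this.symm
      · intro x hx
        rw [hpres x (by rw [hkeepD x hx]; exact hx), hkeep x hx]
      · intro x hx
        rcases List.mem_cons.mp hx with rfl | hx'
        · have h1 : PySem.List.pyGetD visA1 x 0 ≠ -1 := by rw [hselfD]; exact hdpos
          refine ⟨?_, ?_⟩
          · rw [pyGetD_eq_getD_pyGet?, hpres x h1, ← pyGetD_eq_getD_pyGet?, hselfD]
            exact hdpos
          · rw [hpres x h1, hself]; rfl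
        · exact hnew x hx'
    · -- already-visited neighbour: both ports skip it
      have hvA : stepA u (visA, q, cs) v = (visA, q, cs) := by simp [stepA, hvis]
      have hvB : stepB u (visA.map visRel, parent, o) v = (visA.map visRel, parent, o) := by
        simp [stepB, hgetB, visRel, hvis]
      rw [hvA, hvB]
      exact ih visA q cs parent o hinv

lemma get?_foldl_insert_const (u : Int) (L : List Int) :
    ∀ (parent : PySem.Dict Int Int) (x : Int),
    (L.foldl (fun d v => d.insert v u) parent).get? x =
      if x ∈ L then some u else parent.get? x := by
  induction L with
  | nil => intro parent x; simp
  | cons v L ih =>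
    intro parent x
    simp only [List.foldl_cons, ih, List.mem_cons]
    by_cases hL : x ∈ L
    · simp [hL]
    · simp only [hL, if_false, PySem.Dict.get?_insert]
      by_cases hv : x = v <;> simp [hv, hL]

-- decision sequence of Source B's phase-2 loop over one group of n consecutive positions
def condSeg (bfs_order : List Int) (pF : PySem.Dict Int Int) (u : Int) :
    Nat → Nat → PySem.Set Int → Bool × PySem.Set Int
  | _, 0, used => (true, used)
  | i, n+1, used =>
    if bfs_order.length ≤ i then (false, used)
    else
      let x := bfs_order.getD i 0
      if pF.get? x = some u ∧ ¬ PySem.Set.contains used x then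
        condSeg bfs_order pF u (i+1) n (PySem.Set.add used x)
      else (false, used)

lemma judge_peel (bfs_order : List Int) (pF : PySem.Dict Int Int) (u : Int) (L : List Int)
    (hchar : ∀ x, pF.get? x = some u ↔ x ∈ L) :
    ∀ (Lrem : List Int) (rest : List Int) (i : Nat) (used : PySem.Set Int),
    (∀ o ∈ Lrem, o ∈ L) →
    judgeB bfs_order pF i (Lrem ++ rest) used =
      (if (condSeg bfs_order pF u i Lrem.length used).1 then
        judgeB bfs_order pF (i + Lrem.length) rest (condSeg bfs_order pF u i Lrem.length used).2
      else false) := by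
  intro Lrem
  induction Lrem with
  | nil => intro rest i used _; simp [condSeg]
  | cons o Lrem ih =>
    intro rest i used hsub
    have ho : pF.get? o = some u := (hchar o).mpr (hsub o (List.mem_cons_self))
    simp only [List.cons_append, judgeB, List.length_cons, condSeg]
    by_cases hlen : bfs_order.length ≤ i
    · simp [hlen]
    · simp only [hlen, if_false]
      have hx : PySem.List.pyGetD bfs_order (i : Int) 0 = bfs_order.getD i 0 := by
        simp [PySem.List.pyGetD_natCast]
      rw [hx, ho]
      rcases hpx : pF.get? (bfs_order.getD i 0) with _ | px
      · dsimp only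
        simp
      · dsimp only
        by_cases hok : px = u ∧ ¬ PySem.Set.contains used (bfs_order.getD i 0) = true
        · rw [if_pos (show some px = some u ∧
              ¬ PySem.Set.contains used (bfs_order.getD i 0) = true from ⟨by rw [hok.1], hok.2⟩)]
          have hbne : (px != u) = false := by simp [hok.1]
          rw [hbne]
          have hc := hok.2
          rw [Bool.not_eq_true] at hc
          rw [hc]
          simp only [Bool.false_or, Bool.false_eq_true, if_false]
          rw [ih rest (i+1) _ (fun o' ho' => hsub o' (List.mem_cons_of_mem _ ho'))]
          have h2 : i + (Lrem.length + 1) = (i + 1) + Lrem.length := by omega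
          rw [h2]
        · rw [if_neg (show ¬(some px = some u ∧
              ¬ PySem.Set.contains used (bfs_order.getD i 0) = true) from
              fun h => hok ⟨by injection h.1, h.2⟩)]
          rcases not_and_or.mp hok with hne | hc
          · simp [bne_iff_ne, hne]
          · rw [not_not] at hc
            have hb : (px != u || PySem.Set.contains used (bfs_order.getD i 0)) = true := by
              rw [hc, Bool.or_true]
            rw [if_pos hb]
            simp

lemma condSeg_iff (bfs_order : List Int) (pF : PySem.Dict Int Int) (u : Int) (L : List Int)
    (hchar : ∀ x, pF.get? x = some u ↔ x ∈ L) :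
    ∀ (n i : Nat) (used : PySem.Set Int),
    ((condSeg bfs_order pF u i n used).1 = true ↔
      ((n = 0 ∨ i + n ≤ bfs_order.length) ∧ ((bfs_order.drop i).take n).Nodup ∧
        ∀ x ∈ (bfs_order.drop i).take n, x ∈ L ∧ PySem.Set.contains used x = false)) ∧
    ((condSeg bfs_order pF u i n used).1 = true →
      ∀ x, PySem.Set.contains (condSeg bfs_order pF u i n used).2 x = true ↔
        (PySem.Set.contains used x = true ∨ x ∈ (bfs_order.drop i).take n)) := by
  intro n
  induction n with
  | zero =>
    intro i used
    refine ⟨by simp [condSeg], ?_⟩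
    intro _ x
    simp [condSeg]
  | succ n ih =>
    intro i used
    by_cases hlen : bfs_order.length ≤ i
    · refine ⟨?_, ?_⟩
      · simp only [condSeg, hlen, if_true]
        constructor
        · intro h; simp at h
        · rintro ⟨h1, -, -⟩
          rcases h1 with h1 | h1
          · omega
          · omega
      · simp [condSeg, hlen]
    · have hilt : i < bfs_order.length := by omega
      have hdrop : bfs_order.drop i = bfs_order[i] :: bfs_order.drop (i+1) :=
        List.drop_eq_getElem_cons hilt
      have hgetD : bfs_order.getD i 0 = bfs_order[i] := by
        simp [List.getD_eq_getElem?_getD, List.getElem?_eq_getElem hilt]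
      have htake : (bfs_order.drop i).take (n+1) =
          bfs_order[i] :: (bfs_order.drop (i+1)).take n := by
        rw [hdrop]; rfl
      set x0 := bfs_order[i] with hx0
      by_cases hok : pF.get? (bfs_order.getD i 0) = some u ∧
          ¬ PySem.Set.contains used (bfs_order.getD i 0) = true
      · have hcs : condSeg bfs_order pF u i (n+1) used =
            condSeg bfs_order pF u (i+1) n (PySem.Set.add used (bfs_order.getD i 0)) := by
          simp only [condSeg, hlen, if_false, if_pos hok]
        obtain ⟨ihl, ihr⟩ := ih (i+1) (PySem.Set.add used (bfs_order.getD i 0))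
        have hmemL : x0 ∈ L := by rw [← hgetD]; exact (hchar _).mp hok.1
        have hnotused : PySem.Set.contains used x0 = false := by
          rw [← hgetD]; rw [Bool.not_eq_true] at hok; exact hok.2
        have haddc : ∀ y, PySem.Set.contains (PySem.Set.add used (bfs_order.getD i 0)) y = true ↔
            (PySem.Set.contains used y = true ∨ y = x0) := by
          intro y
          rw [hgetD]
          simp [PySem.Set.contains_iff, PySem.Set.mem_add]
        refine ⟨?_, ?_⟩
        · rw [hcs, ihl, htake]
          constructor
          · rintro ⟨h1, h2, h3⟩
            refine ⟨Or.inr ?_, ?_, ?_⟩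
            · rcases h1 with h1 | h1
              · omega
              · omega
            · rw [List.nodup_cons]
              refine ⟨fun hmem => ?_, h2⟩
              have hf := (h3 x0 hmem).2
              have ht : PySem.Set.contains (PySem.Set.add used (bfs_order.getD i 0)) x0 = true :=
                (haddc x0).mpr (Or.inr rfl)
              rw [ht] at hf
              simp at hf
            · intro y hy
              rcases List.mem_cons.mp hy with rfl | hy'
              · exact ⟨hmemL, hnotused⟩
              · obtain ⟨hyL, hyc⟩ := h3 y hy'
                refine ⟨hyL, ?_⟩
                by_contra hcon
                rw [Bool.not_eq_false] at hcon
                have := (haddc y).mpr (Or.inl hcon)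
                rw [this] at hyc
                simp at hyc
          · rintro ⟨h1, h2, h3⟩
            rw [List.nodup_cons] at h2
            refine ⟨Or.inr (by omega), h2.2, ?_⟩
            intro y hy
            obtain ⟨hyL, hyc⟩ := h3 y (List.mem_cons_of_mem _ hy)
            refine ⟨hyL, ?_⟩
            by_contra hcon
            rw [Bool.not_eq_false, haddc] at hcon
            rcases hcon with hcon | rfl
            · rw [hcon] at hyc; simp at hyc
            · exact h2.1 hy
        · intro hc y
          rw [hcs] at hc ⊢
          rw [ihr hc y, haddc, htake]
          constructor
          · rintro ((h | rfl) | h)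
            · exact Or.inl h
            · exact Or.inr (List.mem_cons_self)
            · exact Or.inr (List.mem_cons_of_mem _ h)
          · rintro (h | h)
            · exact Or.inl (Or.inl h)
            · rcases List.mem_cons.mp h with rfl | h'
              · exact Or.inl (Or.inr rfl)
              · exact Or.inr h'
      · have hcs : (condSeg bfs_order pF u i (n+1) used).1 = false := by
          simp only [condSeg, hlen, if_false, if_neg hok]
        refine ⟨?_, ?_⟩
        · rw [hcs]
          constructor
          · intro h; simp at h
          · rintro ⟨-, -, h3⟩
            exfalso
            obtain ⟨hL', hc'⟩ := h3 x0 (by rw [htake]; exact List.mem_cons_self)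
            apply hok
            refine ⟨by rw [hgetD]; exact (hchar _).mpr hL', ?_⟩
            rw [hgetD, hc']
            simp
        · intro h; rw [hcs] at h; simp at h

-- the combinatorial heart: per-position conditions ⇔ A's set equality, for a Nodup group L
lemma cond_iff_setEq (bfs_order : List Int) (L : List Int) (hnd : L.Nodup)
    (i : Nat) (used : PySem.Set Int)
    (hfresh : ∀ x ∈ L, PySem.Set.contains used x = false) :
    ((L.length = 0 ∨ i + L.length ≤ bfs_order.length) ∧ ((bfs_order.drop i).take L.length).Nodup ∧
      ∀ x ∈ (bfs_order.drop i).take L.length, x ∈ L ∧ PySem.Set.contains used x = false) ↔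
    PySem.Set.equal L (PySem.Set.ofList ((bfs_order.drop i).take L.length)) = true := by
  set seg := (bfs_order.drop i).take L.length with hseg
  rw [PySem.Set.equal_iff]
  have hmem_ofList : ∀ x : Int, x ∈ PySem.Set.ofList seg ↔ x ∈ seg := by
    intro x; exact PySem.Set.mem_ofList seg x
  constructor
  · rintro ⟨h1, h2, h3⟩ x
    rw [hmem_ofList]
    rcases h1 with h1 | h1
    · rw [List.length_eq_zero_iff] at h1
      rw [h1] at hnd ⊢
      constructor
      · intro h; simp at h
      · intro h
        have : seg.length = 0 := by rw [hseg, h1]; simp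
        rw [List.length_eq_zero_iff] at this
        rw [this] at h; simp at h
    · have hlenseg : seg.length = L.length := by
        rw [hseg]
        simp only [List.length_take, List.length_drop]
        omega
      have hsub : seg.toFinset ⊆ L.toFinset := by
        intro y hy
        rw [List.mem_toFinset] at *
        exact (h3 y hy).1
      have hcard : L.toFinset.card ≤ seg.toFinset.card := by
        rw [List.toFinset_card_of_nodup hnd, List.toFinset_card_of_nodup h2, hlenseg]
      have heq := Finset.eq_of_subset_of_card_le hsub hcard
      rw [← List.mem_toFinset, ← List.mem_toFinset (l := seg), heq]
  · intro heq
    have hmem : ∀ x, x ∈ L ↔ x ∈ seg := by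
      intro x
      rw [heq x, hmem_ofList]
    by_cases hn : L.length = 0
    · have hsegnil : seg = [] := by
        rw [hseg, hn]; simp
      rw [hsegnil]
      exact ⟨Or.inl hn, List.nodup_nil, by simp⟩
    · have htf : seg.toFinset = L.toFinset := by
        ext y
        rw [List.mem_toFinset, List.mem_toFinset, hmem]
      have hc1 : L.toFinset.card = L.length := List.toFinset_card_of_nodup hnd
      have hc2 : seg.toFinset.card = seg.dedup.length := List.card_toFinset seg
      have hsegle : seg.length ≤ L.length := by
        rw [hseg]; simp [List.length_take]
      have hdedle : seg.dedup.length ≤ seg.length := (List.dedup_sublist seg).length_le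
      have hLs : L.length = seg.dedup.length := by rw [← hc2, htf, hc1]
      have hde : seg.dedup.length = seg.length := by omega
      have hnds : seg.Nodup := by
        have hds : seg.dedup = seg := (List.dedup_sublist seg).eq_of_length hde
        rw [← hds]
        exact List.nodup_dedup seg
      have hlen2 : i + L.length ≤ bfs_order.length := by
        have hmin : seg.length = min L.length (bfs_order.length - i) := by
          rw [hseg]; simp [List.length_take, List.length_drop]
        omega
      exact ⟨Or.inr hlen2, hnds,
        fun y hy => ⟨(hmem y).mpr hy, hfresh y ((hmem y).mpr hy)⟩⟩

lemma getElem_not_mem_drop {α : Type} (l : List α) (hnd : l.Nodup) (k : Nat) (hk : k < l.length) :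
    l[k] ∉ l.drop (k+1) := by
  intro hmem
  rw [List.mem_iff_getElem] at hmem
  obtain ⟨j, hj, hje⟩ := hmem
  rw [List.getElem_drop] at hje
  have := (List.Nodup.getElem_inj_iff hnd).mp hje
  omega

lemma getElem_not_mem_take {α : Type} (l : List α) (hnd : l.Nodup) (k : Nat) (hk : k < l.length) :
    l[k] ∉ l.take k := by
  intro hmem
  rw [List.mem_iff_getElem] at hmem
  obtain ⟨j, hj, hje⟩ := hmem
  rw [List.length_take] at hj
  rw [List.getElem_take] at hje
  have := (List.Nodup.getElem_inj_iff hnd).mp hje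
  omega

lemma getElem_mem_take_succ {α : Type} (l : List α) (k : Nat) (hk : k < l.length) :
    l[k] ∈ l.take (k+1) := by
  rw [List.mem_iff_getElem]
  exact ⟨k, by rw [List.length_take]; omega, by rw [List.getElem_take]⟩

-- the main joint induction: A's validate-inside-BFS loop ⇔ B's BFS followed by the judge,
-- together with the facts about B's final parent map that the group characterisation needs
lemma main_loop (graph : List (List Int)) (bfs_order : List Int) :
    ∀ (fuel : Nat) (order : List Int) (visA : List Int)
      (parent : PySem.Dict Int Int) (used : PySem.Set Int) (head : Nat),
    head ≤ order.length →
    order.Nodup →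
    (∀ x ∈ visA, -1 ≤ x) →
    (∀ x ∈ order, PySem.List.pyGetD visA x 0 ≠ -1 ∧ (PySem.List.pyGet? visA x).isSome) →
    (∀ x u', parent.get? x = some u' → u' ∈ order.take head) →
    (∀ x, PySem.Set.contains used x = true ↔ x ∈ order.drop 1) →
    (bfsLoopA graph bfs_order fuel (order.drop head) visA (order.length : Int) =
      (match bfsB graph fuel (visA.map visRel) parent order head with
       | none => false
       | some (pF, oF) => judgeB bfs_order pF order.length (oF.drop order.length) used)) ∧
    (∀ pF oF, bfsB graph fuel (visA.map visRel) parent order head = some (pF, oF) →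
      ((∃ t, oF = order ++ t) ∧ oF.Nodup ∧
       (∀ x, PySem.List.pyGetD visA x 0 ≠ -1 → pF.get? x = parent.get? x) ∧
       (∀ x w, pF.get? x = some w → parent.get? x = some w ∨ w ∈ oF.drop head))) := by
  intro fuel
  induction fuel with
  | zero =>
    intro order visA parent used head _ _ _ _ _ _
    exact ⟨rfl, fun pF oF h => by simp [bfsB] at h⟩
  | succ fuel ih =>
    intro order visA parent used head hhead hnodup hinv hordvis hpar hused
    by_cases hh : head < order.length
    · -- pop step
      have hqueue : order.drop head = order[head] :: order.drop (head+1) :=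
        List.drop_eq_getElem_cons hh
      have hu : order.getD head 0 = order[head] := by
        simp [List.getD_eq_getElem?_getD, List.getElem?_eq_getElem hh]
      set u : Int := order[head] with hudef
      obtain ⟨L, visA', hA, hB, hinv', hndL, hfresh, hpres, hnew⟩ :=
        fold_corr u (PySem.List.pyGetD graph u []) visA (order.drop (head+1))
          PySem.Set.empty parent order hinv
      -- the child set A computes is exactly the list L
      have hcs : PySem.Set.update PySem.Set.empty L = L := by
        show PySem.Set.update ([] : List Int) L = L
        rw [PySem.Set.update_nil_left]
        exact PySem.Set.ofList_eq_self_of_nodup L hndL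
      have hlenL : PySem.Set.len (L : PySem.Set Int) = (L.length : Int) := rfl
      -- new invariants for the recursive call
      have hdisjLord : ∀ x ∈ L, x ∉ order := by
        intro x hxL hxo
        exact (hordvis x hxo).1 (hfresh x hxL)
      have hnodup' : (order ++ L).Nodup := by
        rw [List.nodup_append]
        refine ⟨hnodup, hndL, ?_⟩
        intro x hxo y hyL heq
        subst heq
        exact hdisjLord x hyL hxo
      have hordvis' : ∀ x ∈ order ++ L,
          PySem.List.pyGetD visA' x 0 ≠ -1 ∧ (PySem.List.pyGet? visA' x).isSome := by
        intro x hx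
        rcases List.mem_append.mp hx with hxo | hxL
        · obtain ⟨h1, h2⟩ := hordvis x hxo
          have hp := hpres x h1
          refine ⟨?_, by rw [hp]; exact h2⟩
          rw [pyGetD_eq_getD_pyGet?, hp, ← pyGetD_eq_getD_pyGet?]
          exact h1
        · exact hnew x hxL
      set parent' := L.foldl (fun d v => d.insert v u) parent with hparent'
      have hpar' : ∀ x u', parent'.get? x = some u' → u' ∈ (order ++ L).take (head+1) := by
        intro x u' hx
        rw [hparent', get?_foldl_insert_const] at hx
        rw [List.take_append_of_le_length (by omega)]
        split_ifs at hx with hxL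
        · injection hx with hx; subst hx
          exact getElem_mem_take_succ order head hh
        · have := hpar x u' hx
          have hsub : order.take head ⊆ order.take (head+1) := by
            intro y hy
            rw [show order.take head = (order.take (head+1)).take head by
              rw [List.take_take]; congr 1; omega] at hy
            exact List.take_subset _ _ hy
          exact hsub this
      have hdrop1 : (order ++ L).drop 1 = order.drop 1 ++ L :=
        List.drop_append_of_le_length (by omega)
      -- unfold one step of both loops
      have hstepA : bfsLoopA graph bfs_order (fuel+1) (order.drop head) visA (order.length : Int) =
          (if !PySem.Set.equal L (PySem.Set.ofList (PySem.List.slice bfs_order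
              (some (order.length : Int)) (some ((order.length : Int) + (L.length : Int))))) then false
           else bfsLoopA graph bfs_order fuel ((order ++ L).drop (head+1)) visA'
             (((order ++ L).length : Int))) := by
        rw [hqueue]
        simp only [bfsLoopA, ← hudef, hA, hcs, hlenL]
        rw [List.drop_append_of_le_length (by omega), List.length_append]
        push_cast
        rfl
      have hstepB : bfsB graph (fuel+1) (visA.map visRel) parent order head =
          bfsB graph fuel (visA'.map visRel) parent' (order ++ L) (head+1) := by
        simp only [bfsB, if_pos hh, hu, ← hudef, hB, hparent']
      have ihAll := fun (used'' : PySem.Set Int)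
          (husedinv'' : ∀ x, PySem.Set.contains used'' x = true ↔ x ∈ (order ++ L).drop 1) =>
        ih (order ++ L) visA' parent' used'' (head+1)
          (by rw [List.length_append]; omega) hnodup' hinv' hordvis' hpar' husedinv''
      have hslice : PySem.List.slice bfs_order (some (order.length : Int))
          (some ((order.length : Int) + (L.length : Int))) =
          (bfs_order.drop order.length).take L.length :=
        PySem.List.slice_natCast_add bfs_order order.length L.length
      have hfreshused : ∀ x ∈ L, PySem.Set.contains used x = false := by
        intro x hxL
        rw [Bool.eq_false_iff]
        intro hc
        exact hdisjLord x hxL (List.drop_subset _ _ ((hused x).mp hc))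
      have husedinv2 : ∀ x, PySem.Set.contains (PySem.Set.update used L) x = true ↔
          x ∈ (order ++ L).drop 1 := by
        intro x
        have h1 : x ∈ used ↔ x ∈ order.drop 1 := by
          rw [← PySem.Set.contains_iff used x]; exact hused x
        rw [PySem.Set.contains_iff, PySem.Set.mem_update, hdrop1, List.mem_append, h1]
      refine ⟨?_, ?_⟩
      · -- the equality of the two loops
        rw [hstepA, hstepB]
        rcases hR : bfsB graph fuel (visA'.map visRel) parent' (order ++ L) (head+1)
          with _ | ⟨pF, oF⟩
        · -- fuel exhausted in the remaining BFS: both sides give false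
          have hEq := (ihAll _ husedinv2).1
          rw [hR] at hEq
          rw [hEq]
          split <;> rfl
        · obtain ⟨⟨t, hto⟩, hnodF, hstab, horig⟩ := (ihAll _ husedinv2).2 pF oF hR
          have htoF : oF = order ++ (L ++ t) := by rw [hto, List.append_assoc]
          have hhF : head < oF.length := by
            rw [hto]
            simp only [List.length_append]
            omega
          have huF : oF[head] = u := by
            have h1 : oF[head]? = some u := by
              rw [htoF, List.getElem?_append_left (by omega), List.getElem?_eq_getElem hh]
            rw [List.getElem?_eq_getElem hhF] at h1
            injection h1
          have hchar : ∀ x, pF.get? x = some u ↔ x ∈ L := by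
            intro x
            constructor
            · intro hx
              rcases horig x u hx with hp' | hmemdrop
              · rw [get?_foldl_insert_const] at hp'
                split_ifs at hp' with hxL
                · exact hxL
                · exact absurd (hpar x u hp') (getElem_not_mem_take order hnodup head hh)
              · exact absurd hmemdrop (by
                  have := getElem_not_mem_drop oF hnodF head hhF
                  rw [huF] at this
                  exact this)
            · intro hxL
              rw [hstab x (hnew x hxL).1, get?_foldl_insert_const, if_pos hxL]
          have hdropF : oF.drop order.length = L ++ t := by
            rw [htoF, List.drop_left]
          have hpeel := judge_peel bfs_order pF u L hchar L t order.length used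
            (fun o ho => ho)
          obtain ⟨hciff, hcused⟩ := condSeg_iff bfs_order pF u L hchar L.length order.length used
          have hseteq : (condSeg bfs_order pF u order.length L.length used).1 = true ↔
              PySem.Set.equal L
                (PySem.Set.ofList ((bfs_order.drop order.length).take L.length)) = true := by
            rw [hciff]
            exact cond_iff_setEq bfs_order L hndL order.length used hfreshused
          dsimp only
          rw [hdropF, hpeel, hslice]
          rcases hcond : (condSeg bfs_order pF u order.length L.length used).1 with _ | _
          · -- group check fails: A's set comparison fails too
            have hef : PySem.Set.equal L
                (PySem.Set.ofList ((bfs_order.drop order.length).take L.length)) = false := by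
              rw [Bool.eq_false_iff]
              intro he
              rw [hseteq.mpr he] at hcond
              simp at hcond
            rw [hef]
            rfl
          · -- group check passes: A's set comparison passes; recurse with the updated used set
            have het := hseteq.mp hcond
            rw [het]
            have hmemLs : ∀ x : Int, x ∈ L ↔ x ∈ (bfs_order.drop order.length).take L.length := by
              intro x
              rw [(PySem.Set.equal_iff _ _).mp het x]
              exact PySem.Set.mem_ofList _ x
            have husedinv3 : ∀ x, PySem.Set.contains
                (condSeg bfs_order pF u order.length L.length used).2 x = true ↔
                x ∈ (order ++ L).drop 1 := by
              intro x
              rw [hcused hcond x, hdrop1, List.mem_append, hused x, ← hmemLs x]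
            have hEq := (ihAll _ husedinv3).1
            rw [hR] at hEq
            rw [hEq]
            simp only [Bool.not_true, Bool.false_eq_true, if_false]
            have h1 : (order ++ L).length = order.length + L.length := List.length_append
            have h2 : oF.drop (order.length + L.length) = t := by
              rw [hto, show order.length + L.length = (order ++ L).length from
                (List.length_append).symm, List.drop_left]
            rw [h1, h2]
            simp
      · -- the auxiliary facts about B's completed BFS
        intro pF oF hsome
        rw [hstepB] at hsome
        obtain ⟨⟨t, hto⟩, hnodF, hstab, horig⟩ := (ihAll _ husedinv2).2 pF oF hsome
        have htoF : oF = order ++ (L ++ t) := by rw [hto, List.append_assoc]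
        have hhF : head < oF.length := by
          rw [hto]
          simp only [List.length_append]
          omega
        have huF : oF[head] = u := by
          have h1 : oF[head]? = some u := by
            rw [htoF, List.getElem?_append_left (by omega), List.getElem?_eq_getElem hh]
          rw [List.getElem?_eq_getElem hhF] at h1
          injection h1
        have hdropcons : oF.drop head = oF[head] :: oF.drop (head+1) :=
          List.drop_eq_getElem_cons hhF
        refine ⟨⟨L ++ t, htoF⟩, hnodF, ?_, ?_⟩
        · intro x hvx
          have hxnL : x ∉ L := fun hxL => hvx (hfresh x hxL)
          have hvx' : PySem.List.pyGetD visA' x 0 ≠ -1 := by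
            rw [pyGetD_eq_getD_pyGet?, hpres x hvx, ← pyGetD_eq_getD_pyGet?]
            exact hvx
          rw [hstab x hvx', get?_foldl_insert_const, if_neg hxnL]
        · intro x w hw
          rcases horig x w hw with hp' | hmem
          · rw [get?_foldl_insert_const] at hp'
            split_ifs at hp' with hxL
            · injection hp' with hp'
              subst hp'
              right
              rw [hdropcons, huF]
              exact List.mem_cons_self
            · exact Or.inl hp'
          · right
            rw [hdropcons]
            exact List.mem_cons_of_mem _ hmem
    · -- queue empty: A returns True, B finishes its BFS and judges nothing further
      have hdrop : order.drop head = [] := List.drop_of_length_le (by omega)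
      have hstepB : bfsB graph (fuel+1) (visA.map visRel) parent order head =
          some (parent, order) := by
        simp only [bfsB, if_neg hh]
      refine ⟨?_, ?_⟩
      · rw [hdrop, hstepB]
        simp only [bfsLoopA, List.drop_length, judgeB]
      · intro pF oF h
        rw [hstepB] at h
        injection h with h
        injection h with h1 h2
        subst h1; subst h2
        exact ⟨⟨[], by simp⟩, hnodup, fun x _ => rfl, fun x w hw => Or.inl hw⟩

-- ===== VERDICT (by name: the statement is the Claim_ definition above) =====
theorem bfs_check_spec : Claim_equal_bfs_check := by
  intro graph bfs_order _dom hpre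
  simp only [Spec_bfs_check, bfs_check, bfs_check_alt]
  have hn : 2 ≤ graph.length := hpre.1
  have hN : ((graph.length : Int) - 1 + 1).toNat = graph.length := by omega
  rw [hN]
  have h1 : PySem.List.pySet? (List.replicate graph.length (-1 : Int)) 1 0 =
      some ((List.replicate graph.length (-1 : Int)).set 1 0) := by
    rw [show (1 : Int) = ((1 : Nat) : Int) by norm_num, PySem.List.pySet?_natCast]
    simpa using hn
  have h2 : PySem.List.pySet? (List.replicate graph.length false) 1 true =
      some ((List.replicate graph.length false).set 1 true) := by
    rw [show (1 : Int) = ((1 : Nat) : Int) by norm_num, PySem.List.pySet?_natCast]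
    simpa using hn
  rw [h1, h2]
  set visA0 := (List.replicate graph.length (-1 : Int)).set 1 0 with hv0
  have hmap : visA0.map visRel = (List.replicate graph.length false).set 1 true := by
    rw [hv0, List.map_set, List.map_replicate]
    rfl
  have hinv : ∀ x ∈ visA0, -1 ≤ x := by
    intro x hx
    rcases List.mem_or_eq_of_mem_set hx with hx' | hx'
    · rw [List.eq_of_mem_replicate hx']
    · omega
  have hlenv : visA0.length = graph.length := by
    rw [hv0, List.length_set, List.length_replicate]
  have hget1 : PySem.List.pyGet? visA0 1 = some 0 := by
    rw [show (1 : Int) = ((1 : Nat) : Int) by norm_num, PySem.List.pyGet?_natCast]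
    rw [List.getElem?_eq_getElem (by omega)]
    congr 1
    simp [hv0]
  have hordvis : ∀ x ∈ [(1 : Int)],
      PySem.List.pyGetD visA0 x 0 ≠ -1 ∧ (PySem.List.pyGet? visA0 x).isSome := by
    intro x hx
    rw [List.mem_singleton] at hx
    subst hx
    rw [pyGetD_eq_getD_pyGet?, hget1]
    exact ⟨by norm_num, rfl⟩
  have hparent : ∀ x u', (PySem.Dict.empty : PySem.Dict Int Int).get? x = some u' →
      u' ∈ ([(1 : Int)].take 0) := by
    intro x u' h
    rw [PySem.Dict.get?_empty] at h
    exact absurd h (by simp)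
  have hused : ∀ x : Int, PySem.Set.contains (PySem.Set.empty : PySem.Set Int) x = true ↔
      x ∈ [(1 : Int)].drop 1 := by
    intro x
    simp [PySem.Set.empty, PySem.Set.contains]
  have hmain := (main_loop graph bfs_order (graph.length + 1) [1] visA0 PySem.Dict.empty
    PySem.Set.empty 0 (by simp) (by simp) hinv hordvis hparent hused).1
  rw [hmap] at hmain
  exact hmain
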